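-- pv_equiv track=rewrite | github.com/qienhuang/F-I-T | experiments/real_world/nyc_311_tier2p5/scripts/compute_311_metrics.py | _forward_sum
-- ===== SOURCE A (Python) =====
-- from typing import Any, Optional
--
-- def _forward_sum(arr: list[int], horizon_days: int) -> list[Optional[int]]:
--     # sum_{i=t..t+horizon_days} arr[i]  (inclusive)
--     out: list[Optional[int]] = [None] * len(arr)
--     window_len = horizon_days + 1
--     if window_len <= 0:
--         return out
--
--     running = 0
--     for i, v in enumerate(arr):
--         running += int(v)
--         if i >= window_len:
--             running -= int(arr[i - window_len])
--         if i >= window_len - 1: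
--             start = i - (window_len - 1)
--             out[start] = running
--     return out
-- ===== SOURCE B (Python) =====
-- from typing import Any, Optional
--
-- def _forward_sum(arr: list[int], horizon_days: int) -> list[Optional[int]]:
--     # prefix-sum table, then each window sum is a difference of two prefixes
--     out: list[Optional[int]] = [None] * len(arr)
--     window_len = horizon_days + 1
--     if window_len <= 0:
--         return out
--     prefix = [0]
--     for v in arr:
--         prefix.append(prefix[-1] + int(v))
--     for start in range(0, len(arr) - window_len + 1):
--         out[start] = prefix[start + window_len] - prefix[start]
--     return out
-- ===== Notes on version B (the rewrite author's own statement) =====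
-- stated objective: alternative
-- what changed: Replaces the single-pass sliding-window running sum (add the entering element, subtract the leaving one) with a prefix-sum table built once and a second pass that writes each window sum as a difference of two prefix entries.
import Mathlib
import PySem

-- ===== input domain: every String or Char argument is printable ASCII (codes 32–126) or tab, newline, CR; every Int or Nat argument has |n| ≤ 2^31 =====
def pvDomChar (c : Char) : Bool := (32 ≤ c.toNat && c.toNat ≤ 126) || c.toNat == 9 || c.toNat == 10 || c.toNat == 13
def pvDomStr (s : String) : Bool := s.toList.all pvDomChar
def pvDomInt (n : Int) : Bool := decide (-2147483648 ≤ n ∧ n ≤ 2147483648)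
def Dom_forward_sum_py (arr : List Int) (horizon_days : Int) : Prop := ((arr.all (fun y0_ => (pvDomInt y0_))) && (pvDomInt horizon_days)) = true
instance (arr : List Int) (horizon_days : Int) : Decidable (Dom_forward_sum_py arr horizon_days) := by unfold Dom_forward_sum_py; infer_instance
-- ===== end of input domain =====

-- B replaces A's sliding running sum with a prefix-sum table plus a window-difference pass (alternative decomposition, same cost).

-- ===== PORT A =====
def forward_sum_py (arr : List Int) (horizon_days : Int) : List (Option Int) :=
  let out : List (Option Int) := List.replicate arr.length none
  let w := horizon_days + 1
  if w ≤ 0 then out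
  else
    ((PySem.List.enumerate arr 0).foldl
      (fun (s : Int × List (Option Int)) iv =>
        let running := s.1 + iv.2
        let running := if iv.1 ≥ w then running - PySem.List.pyGetD arr (iv.1 - w) 0 else running
        let out' := if iv.1 ≥ w - 1 then PySem.List.pySetD s.2 (iv.1 - (w - 1)) (some running) else s.2
        (running, out'))
      (0, out)).2

-- ===== PORT B =====
def forward_sum_py_alt (arr : List Int) (horizon_days : Int) : List (Option Int) :=
  let out : List (Option Int) := List.replicate arr.length none
  let w := horizon_days + 1
  if w ≤ 0 then out
  else
    let pre := arr.foldl (fun p v => p ++ [PySem.List.pyGetD p (-1) 0 + v]) [(0 : Int)]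
    (PySem.List.pyRange 0 ((arr.length : Int) - w + 1) 1).foldl
      (fun o s =>
        PySem.List.pySetD o s (some (PySem.List.pyGetD pre (s + w) 0 - PySem.List.pyGetD pre s 0)))
      out

-- ===== PRECONDITION & SPEC =====
def Spec_forward_sum_py (arr : List Int) (horizon_days : Int) (out : List (Option Int)) : Prop := out = forward_sum_py_alt arr horizon_days
instance (arr : List Int) (horizon_days : Int) (out : List (Option Int)) : Decidable (Spec_forward_sum_py arr horizon_days out) := by unfold Spec_forward_sum_py; infer_instance

-- ===== CLAIM (what is proved, stated in full; the proofs are below) =====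
def Claim_equal_forward_sum_py : Prop := ∀ (arr : List Int) (horizon_days : Int), Dom_forward_sum_py arr horizon_days → Spec_forward_sum_py arr horizon_days (forward_sum_py arr horizon_days)

-- ===== LEMMAS AND PROOFS =====

/-- prefix sum of the first `k` elements -/
def pvS (arr : List Int) (k : Nat) : Int := (arr.take k).sum

theorem pvS_succ (arr : List Int) (i : Nat) (h : i < arr.length) :
    pvS arr (i + 1) = pvS arr i + arr[i] := List.sum_take_succ arr i h

theorem pvSetD_int (xs : List (Option Int)) (a : Int) (v : Option Int) (h : 0 ≤ a) :
    PySem.List.pySetD xs a v = xs.set a.toNat v := PySem.List.pySetD_of_nonneg xs v h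

/-- B's append-fold builds `scanl (+)`. -/
theorem pvFoldlAppend (l : List Int) (p : List Int) (a : Int) :
    l.foldl (fun p v => p ++ [PySem.List.pyGetD p (-1) 0 + v]) (p ++ [a]) =
      p ++ List.scanl (· + ·) a l := by
  induction l generalizing p a with
  | nil => simp
  | cons x xs ih =>
    simp only [List.foldl_cons, List.scanl_cons]
    rw [PySem.List.pyGetD_neg_one_append_singleton p a 0]
    rw [ih (p ++ [a]) (a + x)]
    simp

theorem pvScanl_getElem? (l : List Int) (a : Int) (k : Nat) (hk : k ≤ l.length) :
    (List.scanl (· + ·) a l)[k]? = some (a + (l.take k).sum) := by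
  induction l generalizing a k with
  | nil =>
    have : k = 0 := by simpa using hk
    subst this; simp
  | cons x xs ih =>
    cases k with
    | zero => simp
    | succ k =>
      simp only [List.scanl_cons, List.getElem?_cons_succ]
      rw [ih (a + x) k (by simpa using hk)]
      simp [List.take_succ_cons, add_assoc]

theorem pvPrefix_getD (arr : List Int) (k : Nat) (hk : k ≤ arr.length) :
    PySem.List.pyGetD (arr.foldl (fun p v => p ++ [PySem.List.pyGetD p (-1) 0 + v]) [(0 : Int)]) (k : Int) 0
      = pvS arr k := by
  have h := pvFoldlAppend arr [] 0
  rw [List.nil_append] at h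
  rw [h, PySem.List.pyGetD_natCast]
  have h2 := pvScanl_getElem? arr 0 k hk
  simp [List.getD, h2, pvS]

/-- B's set-loop, characterised elementwise. -/
theorem pvSetLoop (pre : List Int) (w b : Int) :
    ∀ (m : Nat) (a : Int) (init : List (Option Int)), 0 ≤ a → (b - a).toNat = m →
    ∀ j : Nat,
      ((PySem.List.pyRange a b 1).foldl
        (fun o s =>
          PySem.List.pySetD o s (some (PySem.List.pyGetD pre (s + w) 0 - PySem.List.pyGetD pre s 0)))
        init)[j]? =
      if a ≤ (j : Int) ∧ (j : Int) < b ∧ j < init.length then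
        some (some (PySem.List.pyGetD pre ((j : Int) + w) 0 - PySem.List.pyGetD pre (j : Int) 0))
      else init[j]? := by
  intro m
  induction m with
  | zero =>
    intro a init ha hm j
    rw [PySem.List.pyRange_one_eq_nil (by omega)]
    simp only [List.foldl_nil]
    rw [if_neg (by omega)]
  | succ m ihm =>
    intro a init ha hm j
    have hab : a < b := by omega
    rw [PySem.List.pyRange_one_cons hab]
    simp only [List.foldl_cons]
    rw [pvSetD_int init a _ ha]
    rw [ihm (a + 1) (init.set a.toNat _) (by omega) (by omega) j]
    simp only [List.length_set, List.getElem?_set]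
    by_cases hja : (j : Int) = a
    · rw [← hja]
      simp only [Int.toNat_natCast]
      split_ifs <;>
        first
          | rfl
          | (exfalso; omega)
          | (rw [List.getElem?_eq_none (by omega)])
    · rw [if_neg (show ¬ a.toNat = j by omega)]
      split_ifs <;> first | rfl | (exfalso; omega)

/-- invariant of A's sliding-window fold -/
theorem pvAloop (arr : List Int) (w : Int) (hw : 1 ≤ w) :
    ∀ (rest : List Int), ∀ (z : Int) (i : Nat) (R : Int) (out : List (Option Int)),
      z = (i : Int) → arr.drop i = rest → R = pvS arr i - pvS arr (i - w.toNat) → out.length = arr.length →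
    ∀ j : Nat,
      ((PySem.List.enumerate rest z).foldl
        (fun (s : Int × List (Option Int)) iv =>
          ((if iv.1 ≥ w then s.1 + iv.2 - PySem.List.pyGetD arr (iv.1 - w) 0 else s.1 + iv.2),
           if iv.1 ≥ w - 1 then
             PySem.List.pySetD s.2 (iv.1 - (w - 1))
               (some (if iv.1 ≥ w then s.1 + iv.2 - PySem.List.pyGetD arr (iv.1 - w) 0 else s.1 + iv.2))
           else s.2))
        (R, out)).2[j]? =
      if ((i : Int) < (j : Int) + w ∧ (j : Int) + w ≤ (arr.length : Int)) then
        some (some (pvS arr (j + w.toNat) - pvS arr j))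
      else out[j]? := by
  intro rest
  induction rest with
  | nil =>
    intro z i R out hz hdrop hR hlen j
    have hle : arr.length ≤ i := List.drop_eq_nil_iff.mp hdrop
    rw [PySem.List.enumerate_nil]
    simp only [List.foldl_nil]
    rw [if_neg (by omega)]
  | cons v rest ih =>
    intro z i R out hz hdrop hR hlen j
    subst hz
    subst hR
    have hi : i < arr.length := by
      by_contra h
      rw [List.drop_eq_nil_of_le (by omega)] at hdrop
      simp at hdrop
    have hv' : arr[i]? = some v := by
      have := congrArg (fun l => l[0]?) hdrop
      simpa [List.getElem?_drop] using this
    have hv : arr[i] = v := by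
      rw [List.getElem?_eq_getElem hi] at hv'
      exact Option.some.inj hv'
    have hdrop' : arr.drop (i + 1) = rest := by
      have h1 : arr.drop (i + 1) = (arr.drop i).drop 1 := by
        rw [List.drop_drop]
      rw [h1, hdrop]
      rfl
    rw [PySem.List.enumerate_cons]
    simp only [List.foldl_cons]
    have hr : (if ((i : Nat) : Int) ≥ w then
          pvS arr i - pvS arr (i - w.toNat) + v - PySem.List.pyGetD arr (((i : Nat) : Int) - w) 0
        else pvS arr i - pvS arr (i - w.toNat) + v)
        = pvS arr (i + 1) - pvS arr (i + 1 - w.toNat) := by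
      have e1 : pvS arr (i + 1) = pvS arr i + arr[i] := pvS_succ arr i hi
      split
      · have hWi : w.toNat ≤ i := by omega
        have hidx : ((i : Nat) : Int) - w = ((i - w.toNat : Nat) : Int) := by omega
        rw [hidx, PySem.List.pyGetD_natCast]
        have hlt : i - w.toNat < arr.length := by omega
        have h1 : arr.getD (i - w.toNat) 0 = arr[i - w.toNat] := by
          simp [List.getD, List.getElem?_eq_getElem hlt]
        have e2 : pvS arr (i + 1 - w.toNat) = pvS arr (i - w.toNat) + arr[i - w.toNat] := by
          rw [show i + 1 - w.toNat = (i - w.toNat) + 1 by omega]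
          exact pvS_succ arr _ (by omega)
        rw [h1]
        rw [e1, e2, hv]
        ring
      · have e0 : i - w.toNat = 0 := by omega
        have e0' : i + 1 - w.toNat = 0 := by omega
        rw [e0, e0', e1, hv]
        ring
    rw [hr]
    rw [ih ((i : Int) + 1) (i + 1)
      (pvS arr (i + 1) - pvS arr (i + 1 - w.toNat))
      (if ((i : Nat) : Int) ≥ w - 1 then
        PySem.List.pySetD out (((i : Nat) : Int) - (w - 1)) (some (pvS arr (i + 1) - pvS arr (i + 1 - w.toNat)))
      else out)
      (by push_cast; ring) hdrop' rfl
      (by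
        split
        · rw [PySem.List.length_pySetD]; exact hlen
        · exact hlen)
      j]
    by_cases hA : (j : Int) + w ≤ (arr.length : Int)
    · by_cases hB : (i : Int) < (j : Int) + w
      · by_cases hC : ((i : Nat) : Int) + 1 < (j : Int) + w
        · rw [if_pos (And.intro (show (((i + 1 : Nat) : Nat) : Int) < (j : Int) + w by push_cast; omega) hA), if_pos (And.intro hB hA)]
        · have hjw : (j : Int) + w = (i : Int) + 1 := by omega
          rw [if_neg (by push_cast; omega), if_pos (And.intro hB hA)]
          rw [if_pos (show ((i : Nat) : Int) ≥ w - 1 by omega)]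
          have hidx : ((i : Nat) : Int) - (w - 1) = ((j : Nat) : Int) := by omega
          rw [hidx, PySem.List.pySetD_natCast]
          rw [List.getElem?_set]
          rw [if_pos (show (j : Nat) < out.length by omega)]
          rw [show i + 1 - w.toNat = j by omega, show j + w.toNat = i + 1 by omega]
          simp
      · rw [if_neg (by push_cast; omega)]
        by_cases hD : ((i : Nat) : Int) ≥ w - 1
        · rw [if_pos hD, pvSetD_int out _ _ (by omega), List.getElem?_set,
            if_neg (show ¬ (((i : Nat) : Int) - (w - 1)).toNat = j by omega), if_neg (by omega)]
        · rw [if_neg hD, if_neg (by omega)]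
    · rw [if_neg (by push_cast; omega)]
      by_cases hD : ((i : Nat) : Int) ≥ w - 1
      · rw [if_pos hD, pvSetD_int out _ _ (by omega), List.getElem?_set,
          if_neg (show ¬ (((i : Nat) : Int) - (w - 1)).toNat = j by omega), if_neg (by omega)]
      · rw [if_neg hD, if_neg (by omega)]

-- ===== VERDICT (by name: the statement is the Claim_ definition above) =====
theorem forward_sum_py_spec : Claim_equal_forward_sum_py := by
  intro arr horizon_days _
  unfold Spec_forward_sum_py
  by_cases hw : horizon_days + 1 ≤ 0
  · simp only [forward_sum_py, forward_sum_py_alt]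
    rw [if_pos hw, if_pos hw]
  · have hw1 : (1 : Int) ≤ horizon_days + 1 := by omega
    apply List.ext_getElem?
    intro j
    simp only [forward_sum_py, forward_sum_py_alt]
    rw [if_neg hw, if_neg hw]
    rw [pvAloop arr (horizon_days + 1) hw1 arr 0 0 0 (List.replicate arr.length none)
      (by simp) (by simp) (by simp [pvS]) (by simp) j]
    rw [pvSetLoop (arr.foldl (fun p v => p ++ [PySem.List.pyGetD p (-1) 0 + v]) [(0 : Int)])
      (horizon_days + 1) ((arr.length : Int) - (horizon_days + 1) + 1)
      (((arr.length : Int) - (horizon_days + 1) + 1) - 0).toNat 0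
      (List.replicate arr.length none) (le_refl 0) rfl j]
    simp only [List.length_replicate]
    by_cases hin : (j : Int) + (horizon_days + 1) ≤ (arr.length : Int)
    · rw [show (j : Int) + (horizon_days + 1) = ((j + (horizon_days + 1).toNat : Nat) : Int) by omega]
      rw [pvPrefix_getD arr (j + (horizon_days + 1).toNat) (by omega)]
      rw [pvPrefix_getD arr j (by omega)]
      split_ifs <;> first | rfl | (exfalso; omega)
    · split_ifs <;> first | rfl | (exfalso; omega)
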